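-- pv_equiv track=rewrite | github.com/parasiitism/AlgoDaily | codility/0-aligned_subset/main.py | solution
-- ===== SOURCE A (Python) =====
-- def solution(A, M):
--     m = {}
--     for i in range(len(A)):
--         num = A[i]
--         mod = num % M
--         # in python -2%3 = 1
--         # if mod != 0 and mod < 0:
--         #     mod = mod + M
--         if mod not in m:
--             m[mod] = 1
--         else:
--             m[mod] += 1
--     res = 0
--     for key in m:
--         res = max(res, m[key])
--     return res
-- ===== SOURCE B (Python) =====
-- def solution(A, M):
--     rems = sorted(x % M for x in A)
--     best = 0
--     run = 0
--     prev = None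
--     for r in rems:
--         if r == prev:
--             run += 1
--         else:
--             run = 1
--             prev = r
--         if run > best:
--             best = run
--     return best
-- ===== Notes on version B (the rewrite author's own statement) =====
-- stated objective: alternative
-- what changed: Replaces the dict-of-counts plus max-over-keys with sort-the-remainders then a single run-length scan of equal consecutive values.
import Mathlib
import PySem

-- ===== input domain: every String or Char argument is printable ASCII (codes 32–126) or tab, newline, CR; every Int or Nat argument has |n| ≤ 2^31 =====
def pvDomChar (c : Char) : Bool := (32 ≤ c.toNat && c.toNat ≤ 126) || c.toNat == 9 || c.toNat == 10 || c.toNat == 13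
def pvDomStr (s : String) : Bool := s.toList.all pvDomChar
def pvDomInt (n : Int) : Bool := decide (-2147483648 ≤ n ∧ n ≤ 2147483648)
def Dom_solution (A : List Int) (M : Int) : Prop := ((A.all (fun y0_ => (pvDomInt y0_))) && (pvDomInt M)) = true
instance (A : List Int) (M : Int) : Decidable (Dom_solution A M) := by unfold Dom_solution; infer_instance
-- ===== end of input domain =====

-- B replaces the dict-of-counts + max-over-keys with sort-then-run-length-scan; equivalence of the return values is proved on Pre_ (M ≠ 0, or A empty).

-- ===== PORT A =====
def solution (A : List Int) (M : Int) : Int :=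
  let m := (PySem.List.pyRange 0 (A.length : Int) 1).foldl
    (fun (m : PySem.Dict Int Int) i =>
      let num := PySem.List.pyGetD A i 0
      let md := PySem.Int.mod num M
      if m.contains md = false then m.insert md 1 else m.insert md (m.getD md 0 + 1))
    PySem.Dict.empty
  m.keys.foldl (fun res key => max res (m.getD key 0)) 0

-- ===== PORT B =====
-- one loop iteration of B's run-length scan: state (best, run, prev)
def pvScanStep (st : Int × Int × Option Int) (r : Int) : Int × Int × Option Int :=
  let best := st.1
  let rp := if st.2.2 = some r then (st.2.1 + 1, st.2.2) else ((1 : Int), some r)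
  (if rp.1 > best then rp.1 else best, rp.1, rp.2)

def solution_alt (A : List Int) (M : Int) : Int :=
  let rems := PySem.List.sorted (A.map (fun x => PySem.Int.mod x M)) (fun r => r) false
  (rems.foldl pvScanStep (0, 0, none)).1

-- ===== PRECONDITION & SPEC =====
-- Pre_ excludes exactly M = 0 with nonempty A, where the Python A (and B) raise ZeroDivisionError.
def Pre_solution (A : List Int) (M : Int) : Prop := M ≠ 0 ∨ A = []
instance (A : List Int) (M : Int) : Decidable (Pre_solution A M) := by unfold Pre_solution; infer_instance
def pvWitness_solution : List Int × Int := ([1, 4, 7, 2], 3)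

def Spec_solution (A : List Int) (M : Int) (out : Int) : Prop := out = solution_alt A M
instance (A : List Int) (M : Int) (out : Int) : Decidable (Spec_solution A M out) := by unfold Spec_solution; infer_instance

-- ===== CLAIM (what is proved, stated in full; the proofs are below) =====
def Claim_equal_solution : Prop := ∀ (A : List Int) (M : Int), Dom_solution A M → Pre_solution A M → Spec_solution A M (solution A M)

-- ===== LEMMAS AND PROOFS =====

-- A's dict loop is the counter of the remainder list; A's result is a running max of counts over the distinct remainders.
lemma solutionA_eq_maxcount (A : List Int) (M : Int) :
    solution A M = (PySem.Set.ofList (A.map (fun x => PySem.Int.mod x M))).foldl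
      (fun res k => max res (((A.map (fun x => PySem.Int.mod x M)).count k : Int))) 0 := by
  unfold solution
  rw [show ((PySem.List.pyRange 0 (A.length : Int) 1).foldl
      (fun (m : PySem.Dict Int Int) i =>
        let num := PySem.List.pyGetD A i 0
        let md := PySem.Int.mod num M
        if m.contains md = false then m.insert md 1 else m.insert md (m.getD md 0 + 1))
      PySem.Dict.empty)
    = PySem.Dict.counter (A.map (fun x => PySem.Int.mod x M)) from ?_]
  · simp only [PySem.Dict.keys_counter, PySem.Dict.getD_counter]
  · rw [PySem.List.foldl_pyRange_zero_pyGetD' A 0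
      (fun (m : PySem.Dict Int Int) num =>
        let md := PySem.Int.mod num M
        if m.contains md = false then m.insert md 1 else m.insert md (m.getD md 0 + 1))
      PySem.Dict.empty]
    rw [PySem.List.foldl_congr_mem A _
      (fun (m : PySem.Dict Int Int) num =>
        m.insert (PySem.Int.mod num M) (m.getD (PySem.Int.mod num M) 0 + 1))
      PySem.Dict.empty
      (by
        intro acc x _
        by_cases h : acc.contains (PySem.Int.mod x M) = false
        · simp only [h]; rw [PySem.Dict.getD_of_not_contains (h := h)]; simp
        · simp [h])]
    rw [← List.foldl_map (f := fun x => PySem.Int.mod x M)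
      (g := fun (m : PySem.Dict Int Int) y => m.insert y (m.getD y 0 + 1))]
    exact PySem.Dict.foldl_insert_getD_add_one_eq_counter _

-- running max over a projection: the result is the init or a projected element
lemma foldl_max_proj_mem {α : Type} (l : List α) (f : α → Int) :
    ∀ i, l.foldl (fun a x => max a (f x)) i = i ∨
      ∃ x ∈ l, l.foldl (fun a x => max a (f x)) i = f x := by
  induction l with
  | nil => intro i; simp
  | cons b t ih =>
    intro i
    rcases ih (max i (f b)) with h | ⟨x, hx, hval⟩
    · rcases max_choice i (f b) with hm | hm
      · left; simpa [hm] using h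
      · right; exact ⟨b, by simp, by simpa [hm] using h⟩
    · right; exact ⟨x, by simp [hx], by simpa using hval⟩

-- lower bounds for the scan: the result dominates best, the pending run + remaining count of a, and every remaining count
lemma scanU (rest : List Int) : ∀ (best run a : Int),
    (a :: rest).Pairwise (· ≤ ·) → 0 ≤ run → run ≤ best →
    best ≤ (rest.foldl pvScanStep (best, run, some a)).1 ∧
    run + (rest.count a : Int) ≤ (rest.foldl pvScanStep (best, run, some a)).1 ∧
    ∀ r ∈ rest, (rest.count r : Int) ≤ (rest.foldl pvScanStep (best, run, some a)).1 := by
  induction rest with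
  | nil => intro best run a _ h0 hrb; simp; omega
  | cons b t ih =>
    intro best run a hp h0 hrb
    have hab : a ≤ b := (List.pairwise_cons.1 hp).1 b (by simp)
    have hpt : (b :: t).Pairwise (· ≤ ·) := (List.pairwise_cons.1 hp).2
    by_cases hba : a = b
    · -- same value: run continues
      subst hba
      have hstep : pvScanStep (best, run, some a) a
          = (max best (run + 1), run + 1, some a) := by
        simp [pvScanStep, max_def]; omega
      rw [List.foldl_cons, hstep]
      obtain ⟨h1, h2, h3⟩ := ih (max best (run + 1)) (run + 1) a
        (by exact hpt) (by omega) (by omega)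
      refine ⟨le_trans (le_max_left _ _) h1, ?_, ?_⟩
      · simp only [List.count_cons_self]; push_cast; omega
      · intro r hr
        rcases List.mem_cons.1 hr with rfl | hrt
        · simp only [List.count_cons_self]; push_cast; omega
        · by_cases hra : r = a
          · subst hra; simp only [List.count_cons_self]; push_cast; omega
          · have hcc : (a :: t).count r = t.count r := by simp [List.count_cons]; omega
            rw [hcc]; exact h3 r hrt
    · -- new value b
      have hstep : pvScanStep (best, run, some a) b
          = (max best 1, 1, some b) := by
        have : ¬ (some a = some b) := by simpa using hba
        simp [pvScanStep, this, max_def]; omega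
      rw [List.foldl_cons, hstep]
      have hlt : a < b := lt_of_le_of_ne hab hba
      have hat : a ∉ (b :: t) := by
        intro hmem
        rcases List.mem_cons.1 hmem with rfl | hmem'
        · exact absurd rfl hba
        · have := (List.pairwise_cons.1 hpt).1 a hmem'
          omega
      obtain ⟨h1, h2, h3⟩ := ih (max best 1) 1 b hpt (by omega) (le_max_right _ _)
      refine ⟨le_trans (le_max_left _ _) h1, ?_, ?_⟩
      · have : (b :: t).count a = 0 := List.count_eq_zero.2 hat
        rw [this]; push_cast; omega
      · intro r hr
        rcases List.mem_cons.1 hr with rfl | hrt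
        · simp only [List.count_cons_self]; push_cast; omega
        · by_cases hrb' : r = b
          · subst hrb'; simp only [List.count_cons_self]; push_cast; omega
          · have hcc : (b :: t).count r = t.count r := by simp [List.count_cons]; omega
            rw [hcc]; exact h3 r hrt


-- membership for the scan result: it is best, the total of the current run, or a full later count
lemma scanM (rest : List Int) : ∀ (best run a : Int),
    (a :: rest).Pairwise (· ≤ ·) → 0 ≤ run → run ≤ best →
    (rest.foldl pvScanStep (best, run, some a)).1 = best ∨
    (rest.foldl pvScanStep (best, run, some a)).1 = run + (rest.count a : Int) ∨
    ∃ r ∈ rest, r ≠ a ∧ (rest.foldl pvScanStep (best, run, some a)).1 = (rest.count r : Int) := by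
  induction rest with
  | nil => intro best run a _ _ _; simp
  | cons b t ih =>
    intro best run a hp h0 hrb
    have hab : a ≤ b := (List.pairwise_cons.1 hp).1 b (by simp)
    have hpt : (b :: t).Pairwise (· ≤ ·) := (List.pairwise_cons.1 hp).2
    by_cases hba : a = b
    · subst hba
      have hstep : pvScanStep (best, run, some a) a
          = (max best (run + 1), run + 1, some a) := by
        simp [pvScanStep, max_def]; omega
      rw [List.foldl_cons, hstep]
      obtain ⟨hU1, hU2, hU3⟩ := scanU t (max best (run + 1)) (run + 1) a hpt (by omega) (by omega)
      rcases ih (max best (run + 1)) (run + 1) a hpt (by omega) (by omega) with h | h | ⟨r, hr, hra, h⟩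
      · rcases max_choice best (run + 1) with hm | hm
        · left; rw [h, hm]
        · -- result = run + 1; must have t.count a = 0
          have hcnt : (t.count a : Int) = 0 := by
            have := hU2; rw [h, hm] at *; omega
          right; left
          rw [h, hm, List.count_cons_self]; push_cast at hcnt ⊢; omega
      · right; left; rw [h, List.count_cons_self]; push_cast; omega
      · right; right
        have hcc : (a :: t).count r = t.count r := by simp [List.count_cons]; omega
        exact ⟨r, by simp [hr], hra, by rwa [hcc]⟩
    · have hstep : pvScanStep (best, run, some a) b
          = (max best 1, 1, some b) := by
        have : ¬ (some a = some b) := by simpa using hba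
        simp [pvScanStep, this, max_def]; omega
      rw [List.foldl_cons, hstep]
      have hlt : a < b := lt_of_le_of_ne hab hba
      have hbne : b ≠ a := fun h => hba h.symm
      obtain ⟨hU1, hU2, hU3⟩ := scanU t (max best 1) 1 b hpt (by omega) (le_max_right _ _)
      rcases ih (max best 1) 1 b hpt (by omega) (le_max_right _ _) with h | h | ⟨r, hr, hrb', h⟩
      · rcases max_choice best 1 with hm | hm
        · left; rw [h, hm]
        · -- result = 1; t.count b = 0, so result = count of b
          have hcnt : (t.count b : Int) = 0 := by
            have := hU2; rw [h, hm] at *; omega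
          right; right
          refine ⟨b, by simp, hbne, ?_⟩
          rw [h, hm, List.count_cons_self]; push_cast at hcnt ⊢; omega
      · right; right
        refine ⟨b, by simp, hbne, ?_⟩
        rw [h, List.count_cons_self]; push_cast; omega
      · right; right
        have hrt : r ∈ t := hr
        have hra : r ≠ a := by
          have := (List.pairwise_cons.1 hpt).1 r hrt
          intro he; subst he; omega
        have hcc : (b :: t).count r = t.count r := by simp [List.count_cons]; omega
        exact ⟨r, by simp [hrt], hra, by rwa [hcc]⟩

-- the scan on a sorted list: bounds and membership used to match A's max-of-counts
lemma scan_char (s : List Int) (hs : s.Pairwise (· ≤ ·)) :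
    0 ≤ (s.foldl pvScanStep (0, 0, none)).1 ∧
    (∀ r ∈ s, (s.count r : Int) ≤ (s.foldl pvScanStep (0, 0, none)).1) ∧
    ((s.foldl pvScanStep (0, 0, none)).1 = 0 ∨
      ∃ r ∈ s, (s.foldl pvScanStep (0, 0, none)).1 = (s.count r : Int)) := by
  cases s with
  | nil => simp
  | cons h s' =>
    have hstep : pvScanStep (0, 0, none) h = (1, 1, some h) := by
      simp [pvScanStep]
    rw [List.foldl_cons, hstep]
    obtain ⟨hU1, hU2, hU3⟩ := scanU s' 1 1 h hs (by omega) (by omega)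
    refine ⟨by omega, ?_, ?_⟩
    · intro r hr
      rcases List.mem_cons.1 hr with rfl | hrt
      · simp only [List.count_cons_self]; push_cast; omega
      · by_cases hrh : r = h
        · subst hrh; simp only [List.count_cons_self]; push_cast; omega
        · have hcc : (h :: s').count r = s'.count r := by simp [List.count_cons]; omega
          rw [hcc]; exact hU3 r hrt
    · right
      rcases scanM s' 1 1 h hs (by omega) (by omega) with hm | hm | ⟨r, hr, hrh, hm⟩
      · have hcnt : (s'.count h : Int) = 0 := by omega
        exact ⟨h, by simp, by rw [hm, List.count_cons_self]; push_cast at hcnt ⊢; omega⟩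
      · exact ⟨h, by simp, by rw [hm, List.count_cons_self]; push_cast; omega⟩
      · have hcc : (h :: s').count r = s'.count r := by simp [List.count_cons]; omega
        exact ⟨r, by simp [hr], by rw [hm, hcc]⟩

-- ===== VERDICT (by name: the statement is the Claim_ definition above) =====
theorem solution_spec : Claim_equal_solution := by
  intro A M _ _
  unfold Spec_solution
  rw [solutionA_eq_maxcount]
  show _ = solution_alt A M
  unfold solution_alt
  set l := A.map (fun x => PySem.Int.mod x M) with hl
  set s := PySem.List.sorted l (fun r => r) false with hsdef
  have hperm : s.Perm l := PySem.List.sorted_perm l (fun r => r) false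
  have hpw : s.Pairwise (· ≤ ·) := by
    simpa using PySem.List.sorted_pairwise l (fun r => r)
  have hcnt : ∀ r : Int, s.count r = l.count r := fun r => hperm.count_eq r
  obtain ⟨hR0, hRub, hRmem⟩ := scan_char s hpw
  obtain ⟨hF0, hFub⟩ := PySem.List.le_foldl_max_int (PySem.Set.ofList l)
    (fun k => (l.count k : Int)) 0
  set R := (s.foldl pvScanStep (0, 0, none)).1 with hR
  set F := (PySem.Set.ofList l).foldl (fun res k => max res ((l.count k : Int))) 0 with hF
  have hRF : R ≤ F := by
    rcases hRmem with h | ⟨r, hr, h⟩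
    · omega
    · have hrl : r ∈ l := hperm.mem_iff.1 hr
      have := hFub r ((PySem.Set.mem_ofList l r).2 hrl)
      rw [h, hcnt r]; exact this
  have hFR : F ≤ R := by
    rcases foldl_max_proj_mem (PySem.Set.ofList l) (fun k => (l.count k : Int)) 0 with h | ⟨k, hk, h⟩
    · rw [← hF] at h; omega
    · have hkl : k ∈ l := (PySem.Set.mem_ofList l k).1 hk
      have hks : k ∈ s := hperm.mem_iff.2 hkl
      have := hRub k hks
      rw [hcnt k] at this
      rw [← hF] at h; rw [h]; exact this
  omega
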